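-- pv_equiv track=rewrite | github.com/clement7903/-DataStructuresAlgorithms---AdventOfCode2022 | 6.tuningtrouble.p2.py | checkRepeatedChar
-- ===== SOURCE A (Python) =====
-- def checkRepeatedChar(substring):
--   present_char = set()
--   for char in substring:
--     if char not in present_char:
--       present_char.add(char)
--     else:
--       return True
--   return False
-- ===== SOURCE B (Python) =====
-- def checkRepeatedChar(substring):
--   return len(set(substring)) != len(substring)
-- ===== Notes on version B (the rewrite author's own statement) =====
-- stated objective: simpler
-- what changed: Replaces the element-by-element membership loop with early exit by a single cardinality comparison: build set(substring) once and compare its size with len(substring).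
import Mathlib
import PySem

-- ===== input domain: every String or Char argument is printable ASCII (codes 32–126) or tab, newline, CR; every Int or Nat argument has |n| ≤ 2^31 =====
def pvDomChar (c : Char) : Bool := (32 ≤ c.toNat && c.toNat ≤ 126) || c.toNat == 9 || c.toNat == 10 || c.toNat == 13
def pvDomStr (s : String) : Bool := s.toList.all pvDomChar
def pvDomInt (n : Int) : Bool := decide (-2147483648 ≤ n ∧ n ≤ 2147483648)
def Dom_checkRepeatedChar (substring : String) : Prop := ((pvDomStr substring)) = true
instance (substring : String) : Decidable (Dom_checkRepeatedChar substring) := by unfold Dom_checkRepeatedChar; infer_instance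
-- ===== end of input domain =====

-- B replaces A's early-exit membership loop by one cardinality comparison (simpler; same cost).

-- ===== PORT A =====
-- the for-loop of A: growing seen-set, early return True on a repeated char
def checkRepeatedCharLoop (chars : List Char) (seen : PySem.Set Char) : Bool :=
  match chars with
  | [] => false
  | c :: rest =>
    if ¬ PySem.Set.contains seen c then
      checkRepeatedCharLoop rest (PySem.Set.add seen c)
    else
      true

def checkRepeatedChar (substring : String) : Bool :=
  checkRepeatedCharLoop substring.toList PySem.Set.empty

-- ===== PORT B =====
def checkRepeatedChar_alt (substring : String) : Bool :=
  decide (PySem.Set.len (PySem.Set.ofList substring.toList) ≠ PySem.Str.len substring)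

-- ===== PRECONDITION & SPEC =====
def Spec_checkRepeatedChar (substring : String) (out : Bool) : Prop := out = checkRepeatedChar_alt substring
instance (substring : String) (out : Bool) : Decidable (Spec_checkRepeatedChar substring out) := by unfold Spec_checkRepeatedChar; infer_instance

-- ===== CLAIM (what is proved, stated in full; the proofs are below) =====
def Claim_equal_checkRepeatedChar : Prop := ∀ (substring : String), Dom_checkRepeatedChar substring → Spec_checkRepeatedChar substring (checkRepeatedChar substring)

-- ===== LEMMAS AND PROOFS =====

theorem pv_len_add_le (s : PySem.Set Char) (c : Char) :
    (PySem.Set.add s c).length ≤ s.length + 1 := by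
  simp only [PySem.Set.add]
  split <;> simp

theorem pv_len_foldl_add_le (l : List Char) (s : PySem.Set Char) :
    (l.foldl PySem.Set.add s).length ≤ s.length + l.length := by
  induction l generalizing s with
  | nil => simp
  | cons c rest ih =>
    simp only [List.foldl_cons, List.length_cons]
    calc ((rest.foldl PySem.Set.add (PySem.Set.add s c)).length)
        ≤ (PySem.Set.add s c).length + rest.length := ih _
      _ ≤ s.length + 1 + rest.length := by
          have := pv_len_add_le s c; omega
      _ = s.length + (rest.length + 1) := by omega

theorem pv_loop_eq (l : List Char) (s : PySem.Set Char) :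
    checkRepeatedCharLoop l s =
      decide ((l.foldl PySem.Set.add s).length ≠ s.length + l.length) := by
  induction l generalizing s with
  | nil => simp [checkRepeatedCharLoop]
  | cons c rest ih =>
    simp only [checkRepeatedCharLoop, List.foldl_cons, List.length_cons]
    by_cases h : PySem.Set.contains s c = true
    · have hc : c ∈ s := by simpa [PySem.Set.contains] using h
      have hadd : PySem.Set.add s c = s := by simp [PySem.Set.add, hc]
      simp only [hadd, h, not_true_eq_false, if_false]
      symm
      rw [decide_eq_true_iff]
      have hle := pv_len_foldl_add_le rest s
      omega
    · have hc : c ∉ s := by simpa [PySem.Set.contains] using h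
      have hadd : (PySem.Set.add s c).length = s.length + 1 := by
        simp [PySem.Set.add, hc]
      rw [if_pos h, ih, decide_eq_decide]
      omega

-- ===== VERDICT (by name: the statement is the Claim_ definition above) =====
theorem checkRepeatedChar_spec : Claim_equal_checkRepeatedChar := by
  intro s _
  unfold Spec_checkRepeatedChar checkRepeatedChar checkRepeatedChar_alt
  rw [PySem.Set.ofList_eq_foldl, pv_loop_eq, decide_eq_decide]
  simp only [PySem.Set.len, PySem.Str.len, PySem.Set.empty, List.length_nil]
  omega
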